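-- pv_equiv track=rewrite | github.com/calfr/advent-of-code-2020 | 09/solution.py | find_first_xmas_error
-- ===== SOURCE A (Python) =====
-- def check_if_composite(number,possibilities):
--     for x in possibilities:
--         if number - x in possibilities:
--             return True
--     return False
--
-- def find_first_xmas_error(buffer_size,inp):
--     buffer = inp[:buffer_size]
--     for item in inp[buffer_size:]:
--         if not check_if_composite(item,buffer):
--             return item
--         else:
--             buffer.pop(0)
--             buffer.append(item)
--     return False
-- ===== SOURCE B (Python) =====
-- def _has_pair(a, target):
--     # a is sorted ascending; inclusive two-pointer so a value equal to
--     # target/2 present once still counts (mirrors the self-pairing of a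
--     # membership check).
--     left, right = 0, len(a) - 1
--     while left <= right:
--         s = a[left] + a[right]
--         if s == target:
--             return True
--         elif s < target:
--             left += 1
--         else:
--             right -= 1
--     return False
--
-- def find_first_xmas_error(buffer_size, inp):
--     n = len(inp[:buffer_size])
--     for j in range(n, len(inp)):
--         if not _has_pair(sorted(inp[j - n:j]), inp[j]):
--             return inp[j]
--     return False
-- ===== Notes on version B (the rewrite author's own statement) =====
-- stated objective: alternative
-- what changed: The per-window membership scan (for each x, test 'item - x in buffer') is replaced by an inclusive two-pointer sweep over a sorted copy of the window, and the window slides by index arithmetic over slices instead of mutating a buffer with pop(0)/append.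
-- outside the precondition, e.g. on find_first_xmas_error(1, [1, 2]): A returns False, B returns False
import Mathlib
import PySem

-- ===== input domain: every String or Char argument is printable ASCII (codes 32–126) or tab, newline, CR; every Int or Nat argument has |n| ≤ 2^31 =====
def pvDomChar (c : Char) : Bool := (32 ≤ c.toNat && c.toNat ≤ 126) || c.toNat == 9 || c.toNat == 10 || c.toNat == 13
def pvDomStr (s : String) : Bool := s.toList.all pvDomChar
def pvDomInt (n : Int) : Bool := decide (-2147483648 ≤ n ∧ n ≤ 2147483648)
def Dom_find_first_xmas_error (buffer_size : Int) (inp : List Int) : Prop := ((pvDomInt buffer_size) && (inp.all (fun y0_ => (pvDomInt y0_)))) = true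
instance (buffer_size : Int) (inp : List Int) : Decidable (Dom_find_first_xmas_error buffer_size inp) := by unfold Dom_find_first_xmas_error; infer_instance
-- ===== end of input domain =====

-- B replaces the linear membership scan per window element by an inclusive two-pointer
-- sweep over a sorted copy of the window, and slides the window by index arithmetic
-- instead of mutating a buffer (alternative; B does not mutate inp, A only mutates its
-- private copy, so observable behaviour is the return value in both).

-- ===== PORT A =====
-- 'for x in possibilities: if number - x in possibilities: return True / return False'
-- (an early-return-True scan over the list is List.any of the same test).
def check_if_composite (number : Int) (possibilities : List Int) : Bool :=
  possibilities.any (fun x => possibilities.contains (number - x))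

-- the 'for item in inp[buffer_size:]' loop carrying the mutable buffer.
-- 'buffer.pop(0)' is List.tail: the else branch is only reached when
-- check_if_composite returned True, which forces buffer ≠ [] (Python's pop(0)
-- never sees an empty buffer here).  'return False' is the Int 0, excluded by Pre_.
def findLoopA : List Int → List Int → Int
  | _, [] => 0
  | buffer, item :: rest =>
      if !check_if_composite item buffer then item
      else findLoopA (buffer.tail ++ [item]) rest

def find_first_xmas_error (buffer_size : Int) (inp : List Int) : Int :=
  findLoopA (PySem.List.slice inp none (some buffer_size))
            (PySem.List.slice inp (some buffer_size) none)

-- ===== PORT B =====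
-- the 'while left <= right' two-pointer loop of _has_pair; a[left]/a[right] are
-- always in range when read (0 ≤ left ≤ right < len), so the .getD 0 default is
-- never the value used.
def tpLoop (a : List Int) (target : Int) (left right : Int) : Bool :=
  if left ≤ right then
    let s := (PySem.List.pyGet? a left).getD 0 + (PySem.List.pyGet? a right).getD 0
    if s = target then true
    else if s < target then tpLoop a target (left + 1) right
    else tpLoop a target left (right - 1)
  else false
termination_by (right - left + 1).toNat
decreasing_by all_goals omega

def has_pair (a : List Int) (target : Int) : Bool :=
  tpLoop a target 0 ((a.length : Int) - 1)

-- 'for j in range(n, len(inp)): if not _has_pair(sorted(inp[j-n:j]), inp[j]): return inp[j]'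
def findLoopB (inp : List Int) (n : Nat) (j : Nat) : Int :=
  if h : j < inp.length then
    if !has_pair (PySem.List.sorted
                   (PySem.List.slice inp (some ((j : Int) - (n : Int))) (some (j : Int)))
                   (fun x => x) false) inp[j]
    then inp[j]
    else findLoopB inp n (j + 1)
  else 0
termination_by inp.length - j

def find_first_xmas_error_alt (buffer_size : Int) (inp : List Int) : Int :=
  let n := (PySem.List.slice inp none (some buffer_size)).length
  findLoopB inp n n

-- ===== PRECONDITION & SPEC =====
-- Pre_ excludes exactly the inputs on which every element after the initial window is a
-- sum of two window values: there Python A returns the bool False, not an int.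
def Pre_find_first_xmas_error (buffer_size : Int) (inp : List Int) : Prop :=
  ∃ j < inp.length, (PySem.List.slice inp none (some buffer_size)).length ≤ j ∧
    ∀ x ∈ (inp.drop (j - (PySem.List.slice inp none (some buffer_size)).length)).take
            (PySem.List.slice inp none (some buffer_size)).length,
      ∀ y ∈ (inp.drop (j - (PySem.List.slice inp none (some buffer_size)).length)).take
              (PySem.List.slice inp none (some buffer_size)).length,
        x + y ≠ inp.getD j 0
instance (buffer_size : Int) (inp : List Int) : Decidable (Pre_find_first_xmas_error buffer_size inp) := by
  unfold Pre_find_first_xmas_error; infer_instance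

def pvWitness_find_first_xmas_error : Int × List Int := (2, [1, 2, 10])

def Spec_find_first_xmas_error (buffer_size : Int) (inp : List Int) (out : Int) : Prop := out = find_first_xmas_error_alt buffer_size inp
instance (buffer_size : Int) (inp : List Int) (out : Int) : Decidable (Spec_find_first_xmas_error buffer_size inp out) := by unfold Spec_find_first_xmas_error; infer_instance

-- ===== CLAIM (what is proved, stated in full; the proofs are below) =====
def Claim_equal_find_first_xmas_error : Prop := ∀ (buffer_size : Int) (inp : List Int), Dom_find_first_xmas_error buffer_size inp → Pre_find_first_xmas_error buffer_size inp → Spec_find_first_xmas_error buffer_size inp (find_first_xmas_error buffer_size inp)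

-- ===== LEMMAS AND PROOFS =====

-- A's inner scan checked as a pair-of-values condition.
theorem check_iff (t : Int) (w : List Int) :
    check_if_composite t w = true ↔ ∃ x ∈ w, ∃ y ∈ w, x + y = t := by
  unfold check_if_composite
  simp only [List.any_eq_true, List.contains_iff_mem]
  constructor
  · rintro ⟨x, hx, hy⟩
    exact ⟨x, hx, t - x, hy, by ring⟩
  · rintro ⟨x, hx, y, hy, hxy⟩
    exact ⟨x, hx, by simpa [show t - x = y by omega] using hy⟩

theorem pyGet?_in (a : List Int) (i : Int) (h0 : 0 ≤ i) (h1 : i.toNat < a.length) :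
    (PySem.List.pyGet? a i).getD 0 = a[i.toNat]'h1 := by
  simp [PySem.List.pyGet?, PySem.List.pyIdx?]
  rw [if_pos h0, if_pos (by omega : i < (a.length : Int))]
  simp [List.getElem?_eq_getElem h1]

-- two-pointer soundness: a hit names two in-range elements summing to target.
theorem tpLoop_sound (a : List Int) (t : Int) (l r : Int)
    (hl : 0 ≤ l) (hr : r < (a.length : Int)) (h : tpLoop a t l r = true) :
    ∃ x ∈ a, ∃ y ∈ a, x + y = t := by
  fun_induction tpLoop a t l r with
  | case1 l r hle s hs =>
      have hlm : l.toNat < a.length := by omega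
      have hrm : r.toNat < a.length := by omega
      refine ⟨a[l.toNat], List.getElem_mem hlm, a[r.toNat], List.getElem_mem hrm, ?_⟩
      rw [← pyGet?_in a l hl hlm, ← pyGet?_in a r (by omega) hrm]
      exact hs
  | case2 l r hle s hne hlt ih => exact ih (by omega) hr h
  | case3 l r hle s hne hge ih => exact ih hl (by omega) h
  | case4 l r hle => simp at h

-- two-pointer completeness on a ≤-sorted list.
theorem tpLoop_complete (a : List Int) (t : Int)
    (hsort : ∀ (p q : Nat) (hp : p ≤ q) (hq : q < a.length), a[p]'(by omega) ≤ a[q]'hq) :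
    ∀ (l r : Int), 0 ≤ l → r < (a.length : Int) →
    ∀ (i j : Nat) (hij : i ≤ j) (hj : j < a.length),
      l ≤ (i : Int) → (j : Int) ≤ r → a[i]'(by omega) + a[j]'hj = t →
      tpLoop a t l r = true := by
  intro l r
  fun_induction tpLoop a t l r with
  | case1 l r hle s hs => intros; rfl
  | case2 l r hle s hne hlt ih =>
      intro hl hr i j hij hj hli hjr hsum
      have hlm : l.toNat < a.length := by omega
      have hrm : r.toNat < a.length := by omega
      have hsval : s = a[l.toNat]'hlm + a[r.toNat]'hrm := by
        rw [← pyGet?_in a l hl hlm, ← pyGet?_in a r (by omega) hrm]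
      -- i ≠ l: otherwise a[i] + a[j] ≤ a[l] + a[r] = s < t
      have hne_il : (i : Int) ≠ l := by
        intro heq
        have hil : i = l.toNat := by omega
        have h1 : a[j]'hj ≤ a[r.toNat]'hrm := hsort j r.toNat (by omega) hrm
        have h2 : a[i]'(by omega) = a[l.toNat]'hlm := by subst hil; rfl
        omega
      exact ih (by omega) hr i j hij hj (by omega) hjr hsum
  | case3 l r hle s hne hgt ih =>
      intro hl hr i j hij hj hli hjr hsum
      have hlm : l.toNat < a.length := by omega
      have hrm : r.toNat < a.length := by omega
      have hsval : s = a[l.toNat]'hlm + a[r.toNat]'hrm := by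
        rw [← pyGet?_in a l hl hlm, ← pyGet?_in a r (by omega) hrm]
      have hne_jr : (j : Int) ≠ r := by
        intro heq
        have hjr' : j = r.toNat := by omega
        have h1 : a[l.toNat]'hlm ≤ a[i]'(by omega) := hsort l.toNat i (by omega) (by omega)
        have h2 : a[j]'hj = a[r.toNat]'hrm := by subst hjr'; rfl
        omega
      exact ih hl (by omega) i j hij hj hli (by omega) hsum
  | case4 l r hle =>
      intro hl hr i j hij hj hli hjr hsum
      omega

-- the two inner checks agree: B's two-pointer over sorted(w) = A's membership scan over w.
theorem has_pair_eq_check (t : Int) (w : List Int) :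
    has_pair (PySem.List.sorted w (fun x => x) false) t = check_if_composite t w := by
  set a := PySem.List.sorted w (fun x => x) false with ha
  rw [Bool.eq_iff_iff, check_iff]
  have hperm : a.Perm w := ha ▸ PySem.List.sorted_perm w (fun x => x) false
  constructor
  · intro h
    obtain ⟨x, hx, y, hy, hxy⟩ :=
      tpLoop_sound a t 0 ((a.length : Int) - 1) le_rfl (by omega) h
    exact ⟨x, hperm.mem_iff.mp hx, y, hperm.mem_iff.mp hy, hxy⟩
  · rintro ⟨x, hx, y, hy, hxy⟩
    obtain ⟨ix, hix, hxv⟩ := List.getElem_of_mem (hperm.mem_iff.mpr hx)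
    obtain ⟨iy, hiy, hyv⟩ := List.getElem_of_mem (hperm.mem_iff.mpr hy)
    have hsort : ∀ (p q : Nat) (hp : p ≤ q) (hq : q < a.length), a[p]'(by omega) ≤ a[q]'hq := by
      intro p q hp hq
      exact PySem.List.sorted_id_getElem_mono (xs := w) hp hq
    rcases le_total ix iy with hc | hc
    · exact tpLoop_complete a t hsort 0 ((a.length : Int) - 1) le_rfl (by omega)
        ix iy hc hiy (by omega) (by omega) (by rw [hxv, hyv]; exact hxy)
    · exact tpLoop_complete a t hsort 0 ((a.length : Int) - 1) le_rfl (by omega)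
        iy ix hc hix (by omega) (by omega) (by rw [hxv, hyv]; omega)

-- take and tail commute (0 < n).
theorem tail_take' (l : List Int) (n : Nat) (h : 0 < n) : (l.take n).tail = l.tail.take (n - 1) := by
  cases l with
  | nil => simp
  | cons a t => cases n with
    | zero => omega
    | succ m => simp

-- sliding the window: popping the front of the slice and appending inp[j].
theorem window_slide (inp : List Int) (n j : Nat) (hn : 0 < n) (hnj : n ≤ j)
    (hj : j < inp.length) :
    ((inp.drop (j - n)).take n).tail ++ [inp[j]] = (inp.drop (j + 1 - n)).take n := by
  have h1 : ((inp.drop (j - n)).take n).tail = (inp.drop (j - n + 1)).take (n - 1) := by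
    rw [tail_take' _ _ hn, List.tail_drop]
  have h2 : j + 1 - n = j - n + 1 := by omega
  have hlt : n - 1 < (inp.drop (j - n + 1)).length := by
    rw [List.length_drop]; omega
  have h3 : (inp.drop (j - n + 1)).take n
      = (inp.drop (j - n + 1)).take (n - 1) ++ [(inp.drop (j - n + 1))[n - 1]'hlt] := by
    have := List.take_add_one (l := inp.drop (j - n + 1)) (i := n - 1)
    rw [show n - 1 + 1 = n by omega] at this
    rw [this, List.getElem?_eq_getElem hlt]
    rfl
  have h4 : (inp.drop (j - n + 1))[n - 1]'hlt = inp[j] := by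
    rw [List.getElem_drop]
    congr 1
    omega
  rw [h1, h2, h3, h4]

-- B's window slice is A's buffer.
theorem windowB_eq (inp : List Int) (n j : Nat) (hnj : n ≤ j) :
    PySem.List.slice inp (some ((j : Int) - (n : Int))) (some (j : Int))
      = (inp.drop (j - n)).take n := by
  have hc : (j : Int) - (n : Int) = ((j - n : Nat) : Int) := by omega
  rw [hc, PySem.List.slice_natCast]
  congr 1
  omega

-- the main loop correspondence.
theorem loop_eq (inp : List Int) (n : Nat) :
    ∀ (j : Nat), n ≤ j →
      findLoopA ((inp.drop (j - n)).take n) (inp.drop j) = findLoopB inp n j := by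
  have H : ∀ (fuel j : Nat), inp.length - j ≤ fuel → n ≤ j →
      findLoopA ((inp.drop (j - n)).take n) (inp.drop j) = findLoopB inp n j := by
    intro fuel
    induction fuel with
    | zero =>
        intro j hf hnj
        have hj : inp.length ≤ j := by omega
        rw [show inp.drop j = [] from List.drop_eq_nil_of_le hj]
        unfold findLoopB
        rw [dif_neg (by omega)]
        rfl
    | succ fuel ih =>
        intro j hf hnj
        by_cases hj : j < inp.length
        · rw [List.drop_eq_getElem_cons hj]
          have hcheck : has_pair (PySem.List.sorted
                (PySem.List.slice inp (some ((j : Int) - (n : Int))) (some (j : Int)))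
                (fun x => x) false) inp[j]
              = check_if_composite inp[j] ((inp.drop (j - n)).take n) := by
            rw [windowB_eq inp n j hnj, has_pair_eq_check]
          unfold findLoopA findLoopB
          rw [dif_pos hj, hcheck]
          by_cases hcv : check_if_composite inp[j] ((inp.drop (j - n)).take n) = true
          · rw [if_neg (by simp [hcv]), if_neg (by simp [hcv])]
            have hne : (inp.drop (j - n)).take n ≠ [] := by
              intro hnil
              rw [hnil] at hcv
              simp [check_if_composite] at hcv
            have hn : 0 < n := by
              rcases Nat.eq_zero_or_pos n with h0 | h0
              · exact absurd (by simp [h0]) hne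
              · exact h0
            rw [window_slide inp n j hn hnj hj]
            exact ih (j + 1) (by omega) (by omega)
          · rw [if_pos (by simp [hcv]), if_pos (by simp [hcv])]
        · rw [show inp.drop j = [] from List.drop_eq_nil_of_le (by omega)]
          unfold findLoopB
          rw [dif_neg hj]
          rfl
  intro j hnj
  exact H (inp.length - j) j le_rfl hnj

theorem slice_to_take (inp : List Int) (b : Int) :
    PySem.List.slice inp none (some b) = inp.take (PySem.List.clampIdx inp.length b) := by
  simp [PySem.List.slice]

-- ===== VERDICT (by name: the statement is the Claim_ definition above) =====
theorem find_first_xmas_error_spec : Claim_equal_find_first_xmas_error := by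
  intro buffer_size inp _dom _pre
  unfold Spec_find_first_xmas_error find_first_xmas_error find_first_xmas_error_alt
  have hsl : PySem.List.slice inp none (some buffer_size)
      = inp.take (PySem.List.clampIdx inp.length buffer_size) := slice_to_take inp buffer_size
  have hlen : (PySem.List.slice inp none (some buffer_size)).length
      = PySem.List.clampIdx inp.length buffer_size := by
    rw [hsl, List.length_take, Nat.min_eq_left (PySem.List.clampIdx_le _ _)]
  show findLoopA (PySem.List.slice inp none (some buffer_size))
        (PySem.List.slice inp (some buffer_size) none)
      = findLoopB inp (PySem.List.slice inp none (some buffer_size)).length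
          (PySem.List.slice inp none (some buffer_size)).length
  rw [hlen, hsl, PySem.List.slice_some_none]
  have key := loop_eq inp (PySem.List.clampIdx inp.length buffer_size)
      (PySem.List.clampIdx inp.length buffer_size) le_rfl
  rw [Nat.sub_self, List.drop_zero] at key
  exact key
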